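-- pv_equiv track=rewrite | github.com/shoaloak/rusa-restler | sqli_dict_generator.py | permutate_type_columns
-- ===== SOURCE A (Python) =====
-- from itertools import combinations, permutations
--
-- def permutate_type_columns(columns) -> list:
--     """
--     Generate all permutations of column values, with file read payloads.
--
--     Args:
--     - columns: A list of tuples (column_name, column_type)
--
--     Returns:
--     - A list of tuples, each representing a permutation of column fillers
--     """
--     # Filter columns
--     columns = [
--         (col[0], col[1])
--         for col  in columns
--         if col[0] != 'CONSTRAINT'
--         and not col[0].startswith('FOREIGN')
--     ]
--
--     all_permutations = []
--
--     # Generate permutations for all combinations of all lengths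
--     for length in range(1, len(columns) + 1):
--         # Generate all combinations of a certain length
--         for subset in combinations(columns, length):
--             # Generate all permutations of each combination
--             for perm in permutations(subset):
--                 # Initialize a list to hold the modified column values
--                 modified_perm = []
--
--                 for col_name, col_type in perm:
--                     if 'VARCHAR' in col_type:
--                         # Extract size from col_type and use it to truncate the file read
--                         size = col_type.split('(')[1].split(')')[0]
--                         modified_perm.append(f"(SELECT LEFT(pg_read_file('/etc/passwd'), {size}))")
--                         # f"pg_read_file('PG_VERSION', 1, 2)"
--                     elif 'INT' in col_type or 'SERIAL' in col_type:
--                         # Use 42 for integer columns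
--                         modified_perm.append("42")
--                     elif 'BOOLEAN' in col_type:
--                         # Use a boolean value for boolean columns
--                         modified_perm.append("TRUE")
--                     elif 'DATE' in col_type or 'TIMESTAMP' in col_type:
--                         # Use a sample date for date and timestamp columns
--                         modified_perm.append("'2024-01-01'")
--                     else:
--                         # For other data types, use a generic placeholder or adjust as needed
--                         modified_perm.append("'placeholder_value'")
--
--                 # Collect the modified permutation
--                 all_permutations.append(", ".join(modified_perm))
--
--     return all_permutations
-- ===== SOURCE B (Python) =====
-- def permutate_type_columns(columns) -> list:
--     """Build the filler table in one pass, then generate all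
--     combination/permutation joins by recursion over that table."""
--
--     def filler(col_type):
--         if 'VARCHAR' in col_type:
--             size = col_type.split('(')[1].split(')')[0]
--             return f"(SELECT LEFT(pg_read_file('/etc/passwd'), {size}))"
--         if 'INT' in col_type or 'SERIAL' in col_type:
--             return "42"
--         if 'BOOLEAN' in col_type:
--             return "TRUE"
--         if 'DATE' in col_type or 'TIMESTAMP' in col_type:
--             return "'2024-01-01'"
--         return "'placeholder_value'"
--
--     fillers = [
--         filler(col[1])
--         for col in columns
--         if col[0] != 'CONSTRAINT' and not col[0].startswith('FOREIGN')
--     ]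
--
--     def combos(xs, k):
--         if k == 0:
--             return [[]]
--         if not xs:
--             return []
--         head, rest = xs[0], xs[1:]
--         return [[head] + c for c in combos(rest, k - 1)] + combos(rest, k)
--
--     def removals(xs):
--         if not xs:
--             return []
--         head, rest = xs[0], xs[1:]
--         return [(head, rest)] + [(y, [head] + ys) for (y, ys) in removals(rest)]
--
--     def perms(xs):
--         if not xs:
--             return [[]]
--         return [[y] + p for (y, ys) in removals(xs) for p in perms(ys)]
--
--     return [
--         ", ".join(p)
--         for k in range(1, len(fillers) + 1)
--         for c in combos(fillers, k)
--         for p in perms(c)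
--     ]
-- ===== Notes on version B (the rewrite author's own statement) =====
-- stated objective: alternative
-- what changed: B first builds the resolved filler-string table in one linear pass over the filtered columns, then generates the output by recursive combination and head-removal permutation functions over plain strings (no itertools, no per-element type dispatch inside the combinatoric loops).
import Mathlib
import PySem

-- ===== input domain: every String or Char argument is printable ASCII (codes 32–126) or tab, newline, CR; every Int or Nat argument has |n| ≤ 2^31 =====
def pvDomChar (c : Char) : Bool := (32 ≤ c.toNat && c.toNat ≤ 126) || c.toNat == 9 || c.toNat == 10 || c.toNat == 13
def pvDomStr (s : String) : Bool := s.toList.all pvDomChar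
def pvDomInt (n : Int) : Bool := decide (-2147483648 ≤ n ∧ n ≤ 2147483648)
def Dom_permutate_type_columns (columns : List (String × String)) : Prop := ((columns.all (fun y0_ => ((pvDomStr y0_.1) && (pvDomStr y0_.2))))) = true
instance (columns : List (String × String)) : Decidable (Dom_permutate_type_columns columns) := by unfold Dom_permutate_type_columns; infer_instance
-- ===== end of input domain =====

-- B builds the resolved filler table in one pass, then generates the joins by recursive
-- combination/permutation helpers over plain strings (alternative decomposition, same cost).
-- ===== PORT A =====
-- itertools.combinations(l, k): lexicographic order of index tuples
def pvCombA {α : Type} : List α → Nat → List (List α)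
  | _, 0 => [[]]
  | [], _ + 1 => []
  | x :: xs, k + 1 => ((pvCombA xs k).map (fun c => x :: c)) ++ pvCombA xs (k + 1)

-- itertools.permutations(l): pick each element as head (in position order), recurse on the rest
def pvRemA {α : Type} : List α → List (α × List α)
  | [] => []
  | x :: xs => (x, xs) :: (pvRemA xs).map (fun p => (p.1, x :: p.2))

def pvPermAuxA {α : Type} : Nat → List α → List (List α)
  | 0, _ => [[]]
  | n + 1, l => (pvRemA l).flatMap (fun p => (pvPermAuxA n p.2).map (fun q => p.1 :: q))

def pvPermA {α : Type} (l : List α) : List (List α) := pvPermAuxA l.length l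

def permutate_type_columns (columns : List (String × String)) : List String :=
  -- list comprehension: filter (the tuple rebuild (col[0], col[1]) is the identity on a pair)
  let cols := columns.filter (fun col => col.1 != "CONSTRAINT" && !(PySem.Str.startswith col.1 "FOREIGN"))
  (PySem.List.pyRange 1 ((cols.length : Int) + 1) 1).foldl (fun allPerms length_ =>
    (pvCombA cols length_.toNat).foldl (fun allPerms subset =>
      (pvPermA subset).foldl (fun allPerms perm =>
        let modifiedPerm := perm.foldl (fun mp col =>
          mp ++ [
            if PySem.Str.isIn "VARCHAR" col.2 then
              -- col_type.split('(')[1]: indexing may raise IndexError — excluded by Pre_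
              match PySem.List.pyGet? ((PySem.Str.split? col.2 "(").getD []) 1 with
              | some s1 => "(SELECT LEFT(pg_read_file('/etc/passwd'), " ++ PySem.List.pyGetD ((PySem.Str.split? s1 ")").getD []) 0 "" ++ "))"
              | none => ""  -- Python raises here; outside Pre_
            else if PySem.Str.isIn "INT" col.2 || PySem.Str.isIn "SERIAL" col.2 then "42"
            else if PySem.Str.isIn "BOOLEAN" col.2 then "TRUE"
            else if PySem.Str.isIn "DATE" col.2 || PySem.Str.isIn "TIMESTAMP" col.2 then "'2024-01-01'"
            else "'placeholder_value'"]) []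
        allPerms ++ [PySem.Str.join ", " modifiedPerm]) allPerms) allPerms) []

-- ===== PORT B =====
def pvFillB (colType : String) : String :=
  if PySem.Str.isIn "VARCHAR" colType then
    match PySem.List.pyGet? ((PySem.Str.split? colType "(").getD []) 1 with
    | some s1 => "(SELECT LEFT(pg_read_file('/etc/passwd'), " ++ PySem.List.pyGetD ((PySem.Str.split? s1 ")").getD []) 0 "" ++ "))"
    | none => ""  -- Python raises here; outside Pre_
  else if PySem.Str.isIn "INT" colType || PySem.Str.isIn "SERIAL" colType then "42"
  else if PySem.Str.isIn "BOOLEAN" colType then "TRUE"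
  else if PySem.Str.isIn "DATE" colType || PySem.Str.isIn "TIMESTAMP" colType then "'2024-01-01'"
  else "'placeholder_value'"

def pvCombB {α : Type} : List α → Nat → List (List α)
  | _, 0 => [[]]
  | [], _ + 1 => []
  | x :: xs, k + 1 => ((pvCombB xs k).map (fun c => x :: c)) ++ pvCombB xs (k + 1)

def pvRemB {α : Type} : List α → List (α × List α)
  | [] => []
  | x :: xs => (x, xs) :: (pvRemB xs).map (fun p => (p.1, x :: p.2))

def pvPermAuxB {α : Type} : Nat → List α → List (List α)
  | 0, _ => [[]]
  | n + 1, l => (pvRemB l).flatMap (fun p => (pvPermAuxB n p.2).map (fun q => p.1 :: q))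

def pvPermB {α : Type} (l : List α) : List (List α) := pvPermAuxB l.length l

def permutate_type_columns_alt (columns : List (String × String)) : List String :=
  let fillers := (columns.filter (fun col => col.1 != "CONSTRAINT" && !(PySem.Str.startswith col.1 "FOREIGN"))).map (fun col => pvFillB col.2)
  (PySem.List.pyRange 1 ((fillers.length : Int) + 1) 1).flatMap (fun k =>
    (pvCombB fillers k.toNat).flatMap (fun c =>
      (pvPermB c).map (fun p => PySem.Str.join ", " p)))

-- ===== PRECONDITION & SPEC =====
-- Pre_ excludes exactly the inputs where Python A raises IndexError: a column that survives the
-- filter whose type mentions 'VARCHAR' but contains no '(' (so split('(')[1] is out of range).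
def Pre_permutate_type_columns (columns : List (String × String)) : Prop :=
  ∀ col ∈ columns,
    (col.1 ≠ "CONSTRAINT" ∧ PySem.Str.startswith col.1 "FOREIGN" = false) →
    PySem.Str.isIn "VARCHAR" col.2 = true → PySem.Str.isIn "(" col.2 = true
instance (columns : List (String × String)) : Decidable (Pre_permutate_type_columns columns) := by unfold Pre_permutate_type_columns; infer_instance

def pvWitness_permutate_type_columns : (List (String × String)) := [("name", "VARCHAR(8)"), ("id", "INT")]

def Spec_permutate_type_columns (columns : List (String × String)) (out : List String) : Prop := out = permutate_type_columns_alt columns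
instance (columns : List (String × String)) (out : List String) : Decidable (Spec_permutate_type_columns columns out) := by unfold Spec_permutate_type_columns; infer_instance

-- ===== CLAIM (what is proved, stated in full; the proofs are below) =====
def Claim_equal_permutate_type_columns : Prop := ∀ (columns : List (String × String)), Dom_permutate_type_columns columns → Pre_permutate_type_columns columns → Spec_permutate_type_columns columns (permutate_type_columns columns)

-- ===== LEMMAS AND PROOFS =====

theorem pvComb_map {α β : Type} (g : α → β) : ∀ (l : List α) (k : Nat),
    pvCombB (l.map g) k = (pvCombA l k).map (List.map g) := by
  intro l
  induction l with
  | nil => intro k; cases k <;> simp [pvCombA, pvCombB]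
  | cons x xs ih =>
    intro k
    cases k with
    | zero => simp [pvCombA, pvCombB]
    | succ k => simp [pvCombA, pvCombB, ih, List.map_map, Function.comp]

theorem pvRem_map {α β : Type} (g : α → β) : ∀ (l : List α),
    pvRemB (l.map g) = (pvRemA l).map (fun p => (g p.1, p.2.map g)) := by
  intro l
  induction l with
  | nil => simp [pvRemA, pvRemB]
  | cons x xs ih => simp [pvRemA, pvRemB, ih, List.map_map, Function.comp]

theorem pvPermAux_map {α β : Type} (g : α → β) : ∀ (n : Nat) (l : List α),
    pvPermAuxB n (l.map g) = (pvPermAuxA n l).map (List.map g) := by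
  intro n
  induction n with
  | zero => intro l; simp [pvPermAuxA, pvPermAuxB]
  | succ n ih =>
    intro l
    simp only [pvPermAuxA, pvPermAuxB, pvRem_map g l, List.flatMap_map, List.map_flatMap]
    refine List.flatMap_congr (fun p _ => ?_)
    simp [ih, List.map_map, Function.comp]

theorem pvPerm_map {α β : Type} (g : α → β) (l : List α) :
    pvPermB (l.map g) = (pvPermA l).map (List.map g) := by
  simp [pvPermA, pvPermB, pvPermAux_map g l.length l]

theorem pvFoldl_push_eq_map {α β : Type} (f : α → β) : ∀ (l : List α) (acc : List β),
    l.foldl (fun mp x => mp ++ [f x]) acc = acc ++ l.map f := by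
  intro l
  induction l with
  | nil => simp
  | cons x xs ih => intro acc; simp [ih]

theorem pvFoldl_flat {α β : Type} (f : α → List β) : ∀ (l : List α) (acc : List β),
    l.foldl (fun a x => a ++ f x) acc = acc ++ l.flatMap f := by
  intro l
  induction l with
  | nil => simp
  | cons x xs ih => intro acc; simp [ih]

theorem permutate_type_columns_spec : Claim_equal_permutate_type_columns := by
  unfold Claim_equal_permutate_type_columns
  intro columns _ _
  unfold Spec_permutate_type_columns permutate_type_columns permutate_type_columns_alt
  set L := columns.filter (fun col => col.1 != "CONSTRAINT" && !(PySem.Str.startswith col.1 "FOREIGN")) with hL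
  simp only [List.length_map]
  -- rewrite A's nested accumulator loops as flatMaps, innermost first
  have hinner : ∀ (perm : List (String × String)),
      perm.foldl (fun mp col => mp ++ [pvFillB col.2]) [] = perm.map (fun col => pvFillB col.2) := by
    intro perm; simpa using pvFoldl_push_eq_map (fun col : String × String => pvFillB col.2) perm []
  calc
    (PySem.List.pyRange 1 ((L.length : Int) + 1) 1).foldl (fun allPerms length_ =>
        (pvCombA L length_.toNat).foldl (fun allPerms subset =>
          (pvPermA subset).foldl (fun allPerms perm =>
            allPerms ++ [PySem.Str.join ", " (perm.foldl (fun mp col => mp ++ [pvFillB col.2]) [])])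
            allPerms) allPerms) []
      = (PySem.List.pyRange 1 ((L.length : Int) + 1) 1).flatMap (fun length_ =>
          (pvCombA L length_.toNat).flatMap (fun subset =>
            (pvPermA subset).map (fun perm => PySem.Str.join ", " (perm.map (fun col => pvFillB col.2))))) := by
        simp only [hinner, pvFoldl_push_eq_map, pvFoldl_flat, List.nil_append]
    _ = (PySem.List.pyRange 1 ((L.length : Int) + 1) 1).flatMap (fun k =>
          (pvCombB (L.map (fun col => pvFillB col.2)) k.toNat).flatMap (fun c =>
            (pvPermB c).map (fun p => PySem.Str.join ", " p))) := by
        refine List.flatMap_congr (fun k _ => ?_)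
        rw [pvComb_map, List.flatMap_map]
        refine List.flatMap_congr (fun s _ => ?_)
        simp [pvPerm_map, List.map_map, Function.comp]

-- ===== VERDICT (by name: the statement is the Claim_ definition above) =====
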